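-- pv_equiv track=rewrite | github.com/paiml/depyler | examples/test_profiling.py | process_list
-- ===== SOURCE A (Python) =====
-- def process_list(items: list[int]) -> int:
--     """Process a list with nested loops - O(n squared) complexity."""
--     total: int = 0
--     n: int = len(items)
--     i: int = 0
--     while i < n:
--         j: int = i
--         while j < n:
--             val_i: int = items[i]
--             val_j: int = items[j]
--             if val_i < val_j:
--                 total = total + val_i * val_j
--             j = j + 1
--         i = i + 1
--     return total
-- ===== SOURCE B (Python) =====
-- def process_list(items: list[int]) -> int:
--     """Single pass: aggregate prefix sums per distinct value in a dict;
--     each element contributes value * (sum of earlier strictly smaller elements)."""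
--     total = 0
--     sums: dict[int, int] = {}
--     for x in items:
--         total += x * sum(s for k, s in sums.items() if k < x)
--         sums[x] = sums.get(x, 0) + x
--     return total
-- ===== Notes on version B (the rewrite author's own statement) =====
-- stated objective: alternative
-- what changed: Replaced A's nested index loops over all pairs by a single forward pass that maintains a dict aggregating, per distinct value, the sum of its occurrences so far, and adds x * (sum of earlier strictly smaller values) for each element.
import Mathlib
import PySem

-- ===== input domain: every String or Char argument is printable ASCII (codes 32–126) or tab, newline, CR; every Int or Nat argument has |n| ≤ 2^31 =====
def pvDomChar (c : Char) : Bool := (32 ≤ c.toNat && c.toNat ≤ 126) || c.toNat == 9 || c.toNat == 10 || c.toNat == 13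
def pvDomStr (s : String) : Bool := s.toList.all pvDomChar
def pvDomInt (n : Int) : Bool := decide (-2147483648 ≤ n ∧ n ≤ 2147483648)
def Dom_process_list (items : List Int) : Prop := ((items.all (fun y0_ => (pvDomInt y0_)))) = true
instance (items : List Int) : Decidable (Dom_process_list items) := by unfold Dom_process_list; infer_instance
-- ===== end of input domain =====

-- B replaces A's nested all-pairs loops by one pass with a dict of per-value prefix sums (alternative decomposition, O(n·d)).

-- ===== PORT A =====
-- inner while loop: j runs from its start to n; indices are always in [0, n) = [0, len items), so items[i]/items[j] = pyGetD (exact here)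
def plInner (items : List Int) (n i j total : Int) : Int :=
  if _h : j < n then
    plInner items n i (j + 1)
      (if PySem.List.pyGetD items i 0 < PySem.List.pyGetD items j 0 then
        total + PySem.List.pyGetD items i 0 * PySem.List.pyGetD items j 0
      else total)
  else total
termination_by (n - j).toNat
decreasing_by omega

-- outer while loop over i
def plOuter (items : List Int) (n i total : Int) : Int :=
  if _h : i < n then plOuter items n (i + 1) (plInner items n i i total) else total
termination_by (n - i).toNat
decreasing_by omega

def process_list (items : List Int) : Int :=
  plOuter items (items.length : Int) 0 0

-- ===== PORT B =====
-- one step of B's for-loop: state = (sums dict, total)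
def plStep (st : PySem.Dict Int Int × Int) (x : Int) : PySem.Dict Int Int × Int :=
  (st.1.insert x (st.1.getD x 0 + x),
   st.2 + x * ((st.1.items.filter (fun p => decide (p.1 < x))).map (·.2)).sum)

def process_list_alt (items : List Int) : Int :=
  (items.foldl plStep (PySem.Dict.empty, 0)).2

-- ===== PRECONDITION & SPEC =====
def Spec_process_list (items : List Int) (out : Int) : Prop := out = process_list_alt items
instance (items : List Int) (out : Int) : Decidable (Spec_process_list items out) := by unfold Spec_process_list; infer_instance

-- ===== CLAIM (what is proved, stated in full; the proofs are below) =====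
def Claim_equal_process_list : Prop := ∀ (items : List Int), Dom_process_list items → Spec_process_list items (process_list items)

-- ===== LEMMAS AND PROOFS =====

-- common reference value: sum over pairs p < q with xs[p] < xs[q] of xs[p]*xs[q], head recursion
def sumGt (x : Int) (ys : List Int) : Int := (ys.filter (fun y => decide (x < y))).sum

def shead : List Int → Int
  | [] => 0
  | x :: ys => x * sumGt x ys + shead ys

-- "sum of dict values with key < z"
def dsmall (l : List (Int × Int)) (z : Int) : Int :=
  ((l.filter (fun p => decide (p.1 < z))).map (·.2)).sum

theorem sumGt_nil (x : Int) : sumGt x [] = 0 := rfl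

theorem sumGt_cons (x a : Int) (ys : List Int) :
    sumGt x (a :: ys) = (if x < a then a else 0) + sumGt x ys := by
  simp only [sumGt, List.filter_cons]
  split_ifs with h <;> simp_all

-- A side ------------------------------------------------------------------

theorem plInner_eq (items : List Int) (i : Int) :
    ∀ (m : Nat) (j total : Int), 0 ≤ j → ((items.length : Int) - j).toNat = m →
      plInner items (items.length : Int) i j total =
        total + PySem.List.pyGetD items i 0 * sumGt (PySem.List.pyGetD items i 0) (items.drop j.toNat) := by
  intro m
  induction m with
  | zero =>
    intro j total hj hm
    have hjn : ¬ j < (items.length : Int) := by omega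
    rw [plInner]
    simp only [hjn, dif_neg, not_false_iff]
    have : items.drop j.toNat = [] := by
      apply List.drop_eq_nil_of_le; omega
    rw [this, sumGt_nil]; ring
  | succ m ih =>
    intro j total hj hm
    have hjn : j < (items.length : Int) := by omega
    have hlt : j.toNat < items.length := by omega
    rw [plInner]
    simp only [hjn, dif_pos]
    rw [ih (j + 1) _ (by omega) (by omega)]
    have hdrop : items.drop j.toNat = items[j.toNat] :: items.drop (j.toNat + 1) :=
      List.drop_eq_getElem_cons hlt
    have hj1 : (j + 1).toNat = j.toNat + 1 := by omega
    rw [hj1, hdrop, sumGt_cons]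
    have hgj : PySem.List.pyGetD items j 0 = items[j.toNat] :=
      PySem.List.pyGetD_eq_getElem items 0 hj (by exact_mod_cast hjn)
    rw [hgj]
    split_ifs with h <;> ring

theorem plOuter_eq (items : List Int) :
    ∀ (m : Nat) (i total : Int), 0 ≤ i → ((items.length : Int) - i).toNat = m →
      plOuter items (items.length : Int) i total = total + shead (items.drop i.toNat) := by
  intro m
  induction m with
  | zero =>
    intro i total hi hm
    have hin : ¬ i < (items.length : Int) := by omega
    rw [plOuter]
    simp only [hin, dif_neg, not_false_iff]
    have : items.drop i.toNat = [] := by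
      apply List.drop_eq_nil_of_le; omega
    rw [this]; simp [shead]
  | succ m ih =>
    intro i total hi hm
    have hin : i < (items.length : Int) := by omega
    have hlt : i.toNat < items.length := by omega
    rw [plOuter]
    simp only [hin, dif_pos]
    rw [ih (i + 1) _ (by omega) (by omega)]
    rw [plInner_eq items i _ i total hi rfl]
    have hdrop : items.drop i.toNat = items[i.toNat] :: items.drop (i.toNat + 1) :=
      List.drop_eq_getElem_cons hlt
    have hgi : PySem.List.pyGetD items i 0 = items[i.toNat] :=
      PySem.List.pyGetD_eq_getElem items 0 hi (by exact_mod_cast hin)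
    have hi1 : (i + 1).toNat = i.toNat + 1 := by omega
    rw [hi1, hdrop, hgi, sumGt_cons]
    simp only [shead]
    rw [if_neg (lt_irrefl _)]
    ring

theorem process_list_eq_shead (items : List Int) : process_list items = shead items := by
  unfold process_list
  rw [plOuter_eq items (((items.length : Int)) - 0).toNat 0 0 le_rfl rfl]
  simp

-- B side ------------------------------------------------------------------

-- bs d ys = the total accumulated by B's loop over ys starting from dict d
def bs (d : PySem.Dict Int Int) : List Int → Int
  | [] => 0
  | x :: ys => x * dsmall d.items x + bs (d.insert x (d.getD x 0 + x)) ys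

theorem foldl_plStep (ys : List Int) :
    ∀ (d : PySem.Dict Int Int) (t : Int), (ys.foldl plStep (d, t)).2 = t + bs d ys := by
  induction ys with
  | nil => intro d t; simp [bs]
  | cons x ys ih =>
    intro d t
    simp only [List.foldl_cons, plStep, bs]
    rw [ih]
    unfold dsmall; ring

theorem map_if_eq_self (tl : List (Int × Int)) (x v : Int) (hx : x ∉ tl.map (·.1)) :
    tl.map (fun p => if p.1 == x then (x, v) else p) = tl := by
  induction tl with
  | nil => rfl
  | cons a tl ih =>
    simp only [List.map_cons, List.mem_cons, not_or] at hx ⊢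
    have ha : ¬ a.1 == x := by
      simp only [beq_iff_eq]
      intro h; exact hx.1 (by simp [← h])
    rw [if_neg (by simpa using ha), ih hx.2]

theorem dsmall_replace (z x old : Int) :
    ∀ (l : List (Int × Int)), (l.map (·.1)).Nodup → (x, old) ∈ l →
      dsmall (l.map (fun p => if p.1 == x then (x, old + x) else p)) z =
        dsmall l z + (if x < z then x else 0) := by
  intro l
  induction l with
  | nil => intro _ hm; exact absurd hm (List.not_mem_nil)
  | cons a tl ih =>
    intro hnd hm
    simp only [List.map_cons, List.nodup_cons] at hnd
    rcases List.mem_cons.mp hm with h | h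
    · -- head is the entry (x, old)
      subst h
      simp only [List.map_cons, beq_self_eq_true, if_pos]
      rw [map_if_eq_self tl x (old + x) hnd.1]
      by_cases hlt : x < z
      · simp [dsmall, hlt]; ring
      · simp [dsmall, hlt]
    · -- entry lies in the tail; head key differs from x
      have hxa : ¬ a.1 == x := by
        simp only [beq_iff_eq]
        intro he
        exact hnd.1 (he ▸ (List.mem_map.mpr ⟨(x, old), h, rfl⟩))
      simp only [List.map_cons]
      rw [if_neg (by simpa using hxa)]
      have ihh := ih hnd.2 h
      simp only [dsmall, List.filter_cons] at ihh ⊢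
      by_cases hc : a.1 < z
      · simp only [hc, decide_true, if_true, List.map_cons, List.sum_cons]
        rw [ihh]; ring
      · simp only [hc, decide_false, Bool.false_eq_true, if_false]
        rw [ihh]

theorem dsmall_insert (d : PySem.Dict Int Int) (x z : Int) (hnd : d.keys.Nodup) :
    dsmall (d.insert x (d.getD x 0 + x)).items z = dsmall d.items z + (if x < z then x else 0) := by
  by_cases h : d.contains x
  · -- overwrite in place
    rw [PySem.Dict.items_insert_of_contains _ _ h]
    have hsome : (d.get? x).isSome := by
      rw [← PySem.Dict.contains_eq_isSome_get? d x]; exact h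
    obtain ⟨v, hv⟩ := Option.isSome_iff_exists.mp hsome
    have hmem : (x, v) ∈ d.items := PySem.Dict.mem_items_of_get?_eq_some d hv
    have hgd : d.getD x 0 = v := PySem.Dict.getD_of_get?_eq_some d 0 hv
    rw [hgd]
    exact dsmall_replace z x v d.items hnd hmem
  · -- fresh key appends; getD is the default 0
    rw [PySem.Dict.items_insert_of_not_contains _ _ (by simpa using h)]
    rw [PySem.Dict.getD_of_not_contains d 0 (by simpa using h)]
    by_cases hlt : x < z
    · simp [dsmall, List.filter_append, hlt]
    · simp [dsmall, List.filter_append, hlt]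

theorem sum_map_mul_ite (x : Int) (ys : List Int) :
    (ys.map (fun z => z * (if x < z then x else 0))).sum = x * sumGt x ys := by
  induction ys with
  | nil => simp [sumGt_nil]
  | cons a ys ih =>
    simp only [List.map_cons, List.sum_cons, sumGt_cons, ih]
    split_ifs with h <;> ring

theorem sum_map_split (f g : Int → Int) :
    ∀ (ys : List Int), (ys.map (fun z => f z + g z)).sum = (ys.map f).sum + (ys.map g).sum := by
  intro ys
  induction ys with
  | nil => simp
  | cons a ys ihh => simp only [List.map_cons, List.sum_cons, ihh]; ring

theorem bs_eq_shead : ∀ (ys : List Int) (d : PySem.Dict Int Int), d.keys.Nodup →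
    bs d ys = shead ys + (ys.map (fun z => z * dsmall d.items z)).sum := by
  intro ys
  induction ys with
  | nil => intro d _; simp [bs, shead]
  | cons x ys ih =>
    intro d hnd
    simp only [bs, shead]
    rw [ih _ (PySem.Dict.nodup_keys_insert d x _ hnd)]
    have hcongr : ys.map (fun z => z * dsmall (d.insert x (d.getD x 0 + x)).items z) =
        ys.map (fun z => z * dsmall d.items z + z * (if x < z then x else 0)) := by
      apply List.map_congr_left
      intro z _
      rw [dsmall_insert d x z hnd]; ring
    rw [hcongr]
    rw [sum_map_split (fun z => z * dsmall d.items z) (fun z => z * (if x < z then x else 0)) ys,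
        sum_map_mul_ite]
    simp only [List.map_cons, List.sum_cons]
    ring

theorem process_list_alt_eq_shead (items : List Int) : process_list_alt items = shead items := by
  unfold process_list_alt
  rw [foldl_plStep items PySem.Dict.empty 0]
  rw [bs_eq_shead items PySem.Dict.empty PySem.Dict.nodup_keys_empty]
  have : items.map (fun z => z * dsmall (PySem.Dict.empty : PySem.Dict Int Int).items z) =
      items.map (fun _ => (0 : Int)) := by
    apply List.map_congr_left; intro z _
    simp [dsmall, PySem.Dict.empty]
  rw [this]
  simp

-- ===== VERDICT (by name: the statement is the Claim_ definition above) =====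
theorem process_list_spec : Claim_equal_process_list := by
  intro items _
  unfold Spec_process_list
  rw [process_list_eq_shead, process_list_alt_eq_shead]
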